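-- pv_equiv track=rewrite | github.com/jefflai108/fairseq-ust | examples/hubert/analysis_scripts/utils.py | find_indices_in_list
-- ===== SOURCE A (Python) =====
-- def find_indices_in_list(lst, start_v, end_v):
--     found_lst_start_idx = None
--     found_lst_end_idx = None
--     for j, span in enumerate(lst):
--         if span[0] == start_v:
--             found_lst_start_idx = j
--         if span[1] == end_v:
--             found_lst_end_idx = j
--     return (found_lst_start_idx, found_lst_end_idx)
-- ===== SOURCE B (Python) =====
-- def find_indices_in_list(lst, start_v, end_v):
--     def last_index(values, v):
--         hits = [j for j, x in enumerate(values) if x == v]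
--         return hits[-1] if hits else None
--     return (last_index([s[0] for s in lst], start_v),
--             last_index([s[1] for s in lst], end_v))
-- ===== Notes on version B (the rewrite author's own statement) =====
-- stated objective: alternative
-- what changed: Replaces A's single stateful loop updating two variables by two independent staged passes: project out each component, collect all matching indices with a comprehension, and take the last one.
import Mathlib
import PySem

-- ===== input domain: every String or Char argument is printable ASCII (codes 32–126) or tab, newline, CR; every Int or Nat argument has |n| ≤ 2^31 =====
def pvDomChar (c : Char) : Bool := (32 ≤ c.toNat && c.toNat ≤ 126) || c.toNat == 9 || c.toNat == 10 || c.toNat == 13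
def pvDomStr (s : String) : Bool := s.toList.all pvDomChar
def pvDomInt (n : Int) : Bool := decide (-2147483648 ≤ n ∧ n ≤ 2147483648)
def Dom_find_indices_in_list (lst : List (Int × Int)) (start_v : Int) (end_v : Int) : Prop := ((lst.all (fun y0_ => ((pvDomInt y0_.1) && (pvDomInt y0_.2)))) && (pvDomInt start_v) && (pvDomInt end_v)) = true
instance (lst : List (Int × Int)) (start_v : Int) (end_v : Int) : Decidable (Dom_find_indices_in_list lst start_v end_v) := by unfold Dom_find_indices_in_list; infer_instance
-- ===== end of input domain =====

-- B computes each index by a separate staged pass (project component, list all matching indices, take the last) instead of A's single stateful loop.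


-- ===== PORT A =====
-- the for-loop over enumerate(lst): index j passed along, later matches overwrite earlier ones
def pvAGo (start_v end_v : Int) : List (Int × Int) → Int → Option Int × Option Int → Option Int × Option Int
  | [], _, st => st
  | span :: rest, j, (si, ei) =>
      let si' := if span.1 = start_v then some j else si
      let ei' := if span.2 = end_v then some j else ei
      pvAGo start_v end_v rest (j + 1) (si', ei')

def find_indices_in_list (lst : List (Int × Int)) (start_v : Int) (end_v : Int) : Option Int × Option Int :=
  pvAGo start_v end_v lst 0 (none, none)

-- ===== PORT B =====
-- last_index: comprehension collecting every index whose value equals v (enumerate → zipIdx), then hits[-1] if hits else None (→ getLast?)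
def pvLastIndex (values : List Int) (v : Int) : Option Int :=
  let hits := (PySem.List.enumerate values).filterMap (fun p => if p.2 = v then some p.1 else none)
  hits.getLast?

def find_indices_in_list_alt (lst : List (Int × Int)) (start_v : Int) (end_v : Int) : Option Int × Option Int :=
  (pvLastIndex (lst.map Prod.fst) start_v, pvLastIndex (lst.map Prod.snd) end_v)

-- ===== PRECONDITION & SPEC =====
def Spec_find_indices_in_list (lst : List (Int × Int)) (start_v : Int) (end_v : Int) (out : Option Int × Option Int) : Prop := out = find_indices_in_list_alt lst start_v end_v
instance (lst : List (Int × Int)) (start_v : Int) (end_v : Int) (out : Option Int × Option Int) : Decidable (Spec_find_indices_in_list lst start_v end_v out) := by unfold Spec_find_indices_in_list; infer_instance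

-- ===== CLAIM (what is proved, stated in full; the proofs are below) =====
def Claim_equal_find_indices_in_list : Prop := ∀ (lst : List (Int × Int)) (start_v : Int) (end_v : Int), Dom_find_indices_in_list lst start_v end_v → Spec_find_indices_in_list lst start_v end_v (find_indices_in_list lst start_v end_v)

-- ===== LEMMAS AND PROOFS =====

-- last matching index of a predicate, forward scan with running index (characterises A's overwriting loop)
def pvLastM (p : Int → Prop) [DecidablePred p] : List Int → Int → Option Int
  | [], _ => none
  | x :: xs, j => (pvLastM p xs (j + 1)).or (if p x then some j else none)

theorem pv_or_guard (b : Prop) [Decidable b] (j : Int) (r : Option Int) :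
    (if b then some j else r) = (if b then (some j : Option Int) else none).or r := by
  split_ifs <;> simp [Option.or]

theorem pvAGo_eq (s e : Int) (l : List (Int × Int)) (j : Int) (si ei : Option Int) :
    pvAGo s e l j (si, ei) =
      ((pvLastM (fun x => x = s) (l.map Prod.fst) j).or si,
       (pvLastM (fun x => x = e) (l.map Prod.snd) j).or ei) := by
  induction l generalizing j si ei with
  | nil => simp [pvAGo, pvLastM]
  | cons x xs ih =>
    simp only [pvAGo, List.map_cons, pvLastM, ih, Option.or_assoc]
    rw [← pv_or_guard (x.1 = s) j si, ← pv_or_guard (x.2 = e) j ei]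

theorem pv_getLast?_cons (a : Int) (l : List Int) :
    (a :: l).getLast? = l.getLast?.or (some a) := by
  cases l with
  | nil => simp
  | cons b bs =>
    rw [List.getLast?_cons_cons]
    cases h : (b :: bs).getLast? with
    | none => simp at h
    | some c => simp [Option.or]

theorem pvLastM_eq_lastIndex (v : Int) (vals : List Int) (j : Int) :
    pvLastM (fun x => x = v) vals j =
      ((PySem.List.enumerate vals j).filterMap (fun p => if p.2 = v then some p.1 else none)).getLast? := by
  induction vals generalizing j with
  | nil => simp [pvLastM, PySem.List.enumerate_nil]
  | cons x xs ih =>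
    simp only [pvLastM, PySem.List.enumerate_cons, List.filterMap_cons, ih]
    split_ifs with h
    · rw [pv_getLast?_cons]
    · simp

-- ===== VERDICT (by name: the statement is the Claim_ definition above) =====
theorem find_indices_in_list_spec : Claim_equal_find_indices_in_list := by
  intro lst s e _
  unfold Spec_find_indices_in_list find_indices_in_list find_indices_in_list_alt pvLastIndex
  rw [pvAGo_eq]
  rw [pvLastM_eq_lastIndex, pvLastM_eq_lastIndex]
  simp
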